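-- pv_equiv track=rewrite | github.com/BenalexCheung/poem-names | gen_names/phonology_analyzer.py | _is_difficult_pronunciation
-- ===== SOURCE A (Python) =====
-- def _is_difficult_pronunciation(pinyin1, pinyin2):
--     """检查是否是拗口的发音组合"""
--     # 简化的检查：如果两个字都有复杂的辅音组合
--     difficult_combos = [
--         ('zh', 'ch'), ('ch', 'zh'), ('sh', 'ch'), ('ch', 'sh'),
--         ('zh', 'sh'), ('sh', 'zh'), ('j', 'q'), ('q', 'j')
--     ]
--
--     for combo in difficult_combos:
--         if combo[0] in pinyin1.lower() and combo[1] in pinyin2.lower():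
--             return True
--
--     return False
-- ===== SOURCE B (Python) =====
-- def _is_difficult_pronunciation(pinyin1, pinyin2):
--     """检查是否是拗口的发音组合"""
--     # For each consonant group, index which group members occur in each pinyin,
--     # then ask for a distinct cross pair within the group.
--     l1, l2 = pinyin1.lower(), pinyin2.lower()
--     for group in (('zh', 'ch', 'sh'), ('j', 'q')):
--         s1 = {c for c in group if c in l1}
--         s2 = {c for c in group if c in l2}
--         if any(a != b for a in s1 for b in s2):
--             return True
--     return False
-- ===== Notes on version B (the rewrite author's own statement) =====
-- stated objective: alternative
-- what changed: Replaces the scan over a precomputed flat list of 8 ordered consonant pairs with a per-group index: build the set of group consonants occurring in each pinyin and test for a distinct cross pair within the group.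
import Mathlib
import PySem

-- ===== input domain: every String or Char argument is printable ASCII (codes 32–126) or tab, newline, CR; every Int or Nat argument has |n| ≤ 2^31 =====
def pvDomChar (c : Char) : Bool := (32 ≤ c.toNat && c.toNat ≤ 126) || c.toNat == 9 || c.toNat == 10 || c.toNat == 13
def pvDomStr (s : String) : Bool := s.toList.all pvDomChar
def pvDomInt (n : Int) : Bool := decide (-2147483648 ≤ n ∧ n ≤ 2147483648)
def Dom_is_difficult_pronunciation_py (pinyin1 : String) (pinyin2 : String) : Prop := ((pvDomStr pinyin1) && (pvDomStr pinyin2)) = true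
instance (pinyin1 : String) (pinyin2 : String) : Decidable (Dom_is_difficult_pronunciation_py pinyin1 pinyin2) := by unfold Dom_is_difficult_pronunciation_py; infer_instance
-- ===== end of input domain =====

-- B replaces A's scan over 8 precomputed ordered pairs by a per-group occurrence set
-- plus a distinct-cross-pair test (alternative decomposition, same cost).

-- ===== PORT A =====
def pvCombos : List (String × String) :=
  [("zh", "ch"), ("ch", "zh"), ("sh", "ch"), ("ch", "sh"),
   ("zh", "sh"), ("sh", "zh"), ("j", "q"), ("q", "j")]

-- the 'for combo in difficult_combos: if …: return True' loop
def pvALoop (pinyin1 pinyin2 : String) : List (String × String) → Bool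
  | [] => false
  | combo :: rest =>
    if PySem.Str.isIn combo.1 (PySem.Str.lower pinyin1)
        && PySem.Str.isIn combo.2 (PySem.Str.lower pinyin2) then true
    else pvALoop pinyin1 pinyin2 rest

def is_difficult_pronunciation_py (pinyin1 : String) (pinyin2 : String) : Bool :=
  pvALoop pinyin1 pinyin2 pvCombos

-- ===== PORT B =====
-- one iteration of B's loop over the groups: occurrence sets, then a distinct cross pair
def pvBGroup (l1 l2 : String) (group : List String) : Bool :=
  let s1 := PySem.Set.ofList (group.filter (fun c => PySem.Str.isIn c l1))
  let s2 := PySem.Set.ofList (group.filter (fun c => PySem.Str.isIn c l2))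
  s1.any (fun a => s2.any (fun b => a != b))

def is_difficult_pronunciation_py_alt (pinyin1 : String) (pinyin2 : String) : Bool :=
  let l1 := PySem.Str.lower pinyin1
  let l2 := PySem.Str.lower pinyin2
  [["zh", "ch", "sh"], ["j", "q"]].any (pvBGroup l1 l2)

-- ===== PRECONDITION & SPEC =====
def Spec_is_difficult_pronunciation_py (pinyin1 : String) (pinyin2 : String) (out : Bool) : Prop := out = is_difficult_pronunciation_py_alt pinyin1 pinyin2
instance (pinyin1 : String) (pinyin2 : String) (out : Bool) : Decidable (Spec_is_difficult_pronunciation_py pinyin1 pinyin2 out) := by unfold Spec_is_difficult_pronunciation_py; infer_instance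

-- ===== CLAIM (what is proved, stated in full; the proofs are below) =====
def Claim_equal_is_difficult_pronunciation_py : Prop := ∀ (pinyin1 : String) (pinyin2 : String), Dom_is_difficult_pronunciation_py pinyin1 pinyin2 → Spec_is_difficult_pronunciation_py pinyin1 pinyin2 (is_difficult_pronunciation_py pinyin1 pinyin2)

-- ===== LEMMAS AND PROOFS =====

-- ===== VERDICT (by name: the statement is the Claim_ definition above) =====
theorem is_difficult_pronunciation_py_spec : Claim_equal_is_difficult_pronunciation_py := by
  intro p1 p2 _
  show is_difficult_pronunciation_py p1 p2 = is_difficult_pronunciation_py_alt p1 p2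
  simp only [is_difficult_pronunciation_py, is_difficult_pronunciation_py_alt, pvALoop,
    pvCombos, pvBGroup, PySem.Set.ofList, PySem.Set.add, PySem.Set.contains, List.filter,
    List.any]
  generalize PySem.Str.isIn "zh" (PySem.Str.lower p1) = a1
  generalize PySem.Str.isIn "ch" (PySem.Str.lower p1) = a2
  generalize PySem.Str.isIn "sh" (PySem.Str.lower p1) = a3
  generalize PySem.Str.isIn "j" (PySem.Str.lower p1) = a4
  generalize PySem.Str.isIn "q" (PySem.Str.lower p1) = a5
  generalize PySem.Str.isIn "zh" (PySem.Str.lower p2) = b1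
  generalize PySem.Str.isIn "ch" (PySem.Str.lower p2) = b2
  generalize PySem.Str.isIn "sh" (PySem.Str.lower p2) = b3
  generalize PySem.Str.isIn "j" (PySem.Str.lower p2) = b4
  generalize PySem.Str.isIn "q" (PySem.Str.lower p2) = b5
  revert a1 a2 a3 a4 a5 b1 b2 b3 b4 b5
  decide
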